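-- pv_equiv track=rewrite | github.com/UngSangYoon/Algorithm_Study_FISA | 박혁준/그리디/도서관_골드4.py | solution
-- ===== SOURCE A (Python) =====
-- def solution(list_):
--     list_sorted = sorted(list_)  # 리스트 정렬
--
--     # 음수와 양수 리스트 나누기
--     negative = [x for x in list_sorted if x < 0]
--     positive = [x for x in list_sorted if x >= 0]
--
--     # 특정 조건에 따라 값을 더하는 함수
--     def foot_sum(li_):
--         li_abs = [abs(x) for x in li_]  # 절대값 리스트
--         li_len = len(li_abs)
--
--         if li_len % 2 == 1:  # 홀수 개수라면 짝수 인덱스(0, 2, 4...)의 합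
--             return sum(li_abs[i] for i in range(0, li_len, 2))
--         else:  # 짝수 개수라면 홀수 인덱스(1, 3, 5...)의 합
--             return sum(li_abs[i] for i in range(1, li_len, 2))
--
--     # 음수 리스트와 양수 리스트 각각 계산 후 합산
--     return foot_sum(negative) + foot_sum(positive)
-- ===== SOURCE B (Python) =====
-- def solution(list_):
--     # One DESCENDING sort; each sign block is scanned head-first with a toggle,
--     # adding abs of every other element: no length/parity branch, no indexing.
--     def block_sum(li):
--         total, take = 0, True
--         for x in li:
--             if take:
--                 total += abs(x)
--             take = not take
--         return total
--     desc = sorted(list_, reverse=True)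
--     return block_sum([x for x in desc if x >= 0]) + block_sum([x for x in desc if x < 0])
-- ===== Notes on version B (the rewrite author's own statement) =====
-- stated objective: simpler
-- what changed: A sorts ascending, splits, builds an abs list and branches on its length parity to sum forward-indexed even/odd ranges; B sorts descending once and scans each sign block head-first with a boolean toggle accumulator, adding abs of every other element, with no parity branch, no length and no indexing.
import Mathlib
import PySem

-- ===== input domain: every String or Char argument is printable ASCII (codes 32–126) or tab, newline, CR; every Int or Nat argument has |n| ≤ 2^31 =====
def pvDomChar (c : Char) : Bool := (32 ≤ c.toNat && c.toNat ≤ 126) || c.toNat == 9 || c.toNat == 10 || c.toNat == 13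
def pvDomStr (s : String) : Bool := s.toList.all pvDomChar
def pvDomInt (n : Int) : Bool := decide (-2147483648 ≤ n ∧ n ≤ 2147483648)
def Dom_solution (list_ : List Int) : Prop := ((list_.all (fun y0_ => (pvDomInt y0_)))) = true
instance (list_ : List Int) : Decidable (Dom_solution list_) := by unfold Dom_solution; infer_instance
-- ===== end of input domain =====

-- B sorts descending once and scans each sign block with a toggle, replacing A's abs-list, length-parity branch and even/odd index ranges; objective: simpler.

-- ===== PORT A =====
-- inner helper foot_sum of A: parity branch, then sum li_abs[i] over range(0,n,2) / range(1,n,2)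
def footSum (li : List Int) : Int :=
  let liAbs := li.map (fun x => |x|)
  let liLen : Int := (liAbs.length : Int)
  if PySem.Int.mod liLen 2 == 1 then
    ((PySem.List.pyRange 0 liLen 2).map (fun i => PySem.List.pyGetD liAbs i 0)).sum
  else
    ((PySem.List.pyRange 1 liLen 2).map (fun i => PySem.List.pyGetD liAbs i 0)).sum

def solution (list_ : List Int) : Int :=
  let listSorted := PySem.List.sorted list_ (fun x => x) false
  let negative := listSorted.filter (fun x => decide (x < 0))
  let positive := listSorted.filter (fun x => decide (0 ≤ x))
  footSum negative + footSum positive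

-- ===== PORT B =====
-- B's block_sum: a fold over the block carrying (total, take); the toggle flips each step
def blockSum (li : List Int) : Int :=
  (li.foldl (fun (st : Int × Bool) x =>
      ((if st.2 then st.1 + |x| else st.1), !st.2)) (0, true)).1

def solution_alt (list_ : List Int) : Int :=
  let desc := PySem.List.sorted list_ (fun x => x) true
  blockSum (desc.filter (fun x => decide (0 ≤ x)))
    + blockSum (desc.filter (fun x => decide (x < 0)))

-- ===== PRECONDITION & SPEC =====
def Spec_solution (list_ : List Int) (out : Int) : Prop := out = solution_alt list_
instance (list_ : List Int) (out : Int) : Decidable (Spec_solution list_ out) := by unfold Spec_solution; infer_instance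

-- ===== CLAIM (what is proved, stated in full; the proofs are below) =====
def Claim_equal_solution : Prop := ∀ (list_ : List Int), Dom_solution list_ → Spec_solution list_ (solution list_)

-- ===== LEMMAS AND PROOFS =====

-- sum of every other element starting at the head
def frontAlt : List Int → Int
  | [] => 0
  | a :: t => a + frontAlt t.tail
termination_by l => l.length
decreasing_by simp [List.length_tail]

theorem frontAlt_nil : frontAlt [] = 0 := by rw [frontAlt]

theorem frontAlt_cons (a : Int) (t : List Int) : frontAlt (a :: t) = a + frontAlt t.tail := by
  rw [frontAlt]

theorem pyRange_two_nil (a b : Int) (h : b ≤ a) : PySem.List.pyRange a b 2 = [] := by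
  simp [PySem.List.pyRange]
  intro h2; omega

theorem pyRange_two_cons (a b : Int) (h : a < b) :
    PySem.List.pyRange a b 2 = a :: PySem.List.pyRange (a + 2) b 2 := by
  simp [PySem.List.pyRange, h]
  by_cases h2 : a + 2 < b
  · simp only [h2, if_true]
    have hc : (b - a + 2 - 1) / 2 = (b - (a+2) + 2 - 1) / 2 + 1 := by omega
    have hnn : 0 ≤ (b - (a+2) + 2 - 1) / 2 := Int.ediv_nonneg (by omega) (by omega)
    rw [hc]
    rw [show ((b - (a+2) + 2 - 1) / 2 + 1).toNat = ((b - (a+2) + 2 - 1) / 2).toNat + 1 by omega]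
    rw [List.range_succ_eq_map, List.map_cons, List.map_map]
    refine List.cons_eq_cons.mpr ⟨by ring, ?_⟩
    apply List.map_congr_left
    intro k _
    simp [Function.comp]
    ring
  · simp only [h2, if_false]
    rw [show ((b - a + 2 - 1) / 2).toNat = 1 by omega]
    simp [List.range_succ]

-- the step-2 indexed sum is frontAlt of the dropped list (fuel form)
theorem sumStep2Aux (l : List Int) (n : Nat) :
    ∀ (s : Nat), l.length - s ≤ n →
      ((PySem.List.pyRange (s : Int) (l.length : Int) 2).map (fun i => PySem.List.pyGetD l i 0)).sum
        = frontAlt (l.drop s) := by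
  induction n with
  | zero =>
    intro s hs
    rw [pyRange_two_nil _ _ (by exact_mod_cast (by omega : l.length ≤ s))]
    simp [List.drop_eq_nil_of_le (by omega : l.length ≤ s), frontAlt_nil]
  | succ n IH =>
    intro s hs
    by_cases hlt : s < l.length
    · rw [pyRange_two_cons _ _ (by exact_mod_cast hlt)]
      rw [List.map_cons, List.sum_cons]
      rw [show ((s : Int) + 2) = ((s + 2 : Nat) : Int) by push_cast; ring]
      rw [IH (s + 2) (by omega)]
      have hget : PySem.List.pyGetD l (s : Int) 0 = l[s] := by
        rw [PySem.List.pyGetD_eq_getElem l 0 (by positivity) (by exact_mod_cast hlt)]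
        simp
      rw [hget, List.drop_eq_getElem_cons hlt, frontAlt_cons, List.tail_drop]
    · rw [pyRange_two_nil _ _ (by exact_mod_cast (by omega : l.length ≤ s))]
      simp [List.drop_eq_nil_of_le (by omega : l.length ≤ s), frontAlt_nil]

theorem sumStep2 (l : List Int) (s : Nat) :
    ((PySem.List.pyRange (s : Int) (l.length : Int) 2).map (fun i => PySem.List.pyGetD l i 0)).sum
      = frontAlt (l.drop s) :=
  sumStep2Aux l (l.length - s) s (le_refl _)

theorem frontAlt_append_pair (b a : Int) :
    ∀ (r : List Int), frontAlt (r ++ [b, a]) = frontAlt r + (if r.length % 2 = 1 then a else b)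
  | [] => by simp [frontAlt_cons, frontAlt_nil]
  | [c] => by simp [frontAlt_cons, frontAlt_nil]
  | c :: d :: t => by
    have ih := frontAlt_append_pair b a t
    rw [List.cons_append, List.cons_append, frontAlt_cons, List.tail_cons, ih,
        frontAlt_cons, List.tail_cons]
    rw [show (c :: d :: t).length % 2 = t.length % 2 by simp; omega]
    ring

theorem frontAlt_parity :
    ∀ (l : List Int), (if l.length % 2 = 1 then frontAlt l else frontAlt l.tail) = frontAlt l.reverse
  | [] => by simp [frontAlt_nil]
  | [a] => by simp [frontAlt_cons, frontAlt_nil]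
  | a :: b :: t => by
    have ih := frontAlt_parity t
    have hrev : (a :: b :: t).reverse = t.reverse ++ [b, a] := by simp
    have hlen : (a :: b :: t).length % 2 = t.length % 2 := by simp; omega
    rw [hrev, frontAlt_append_pair, List.length_reverse, hlen]
    by_cases hp : t.length % 2 = 1
    · rw [if_pos hp] at ih
      simp only [if_pos hp, frontAlt_cons, List.tail_cons]
      rw [ih]; ring
    · rw [if_neg hp] at ih
      simp only [if_neg hp, frontAlt_cons, List.tail_cons]
      rw [ih]; ring

theorem footSum_eq (li : List Int) : footSum li = frontAlt ((li.map (fun x => |x|)).reverse) := by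
  unfold footSum
  set liAbs := li.map (fun x => |x|) with hA
  have hmod : PySem.Int.mod ((liAbs.length : Int)) 2 = ((liAbs.length % 2 : Nat) : Int) := by
    exact_mod_cast PySem.Int.mod_natCast liAbs.length 2
  have h0 := sumStep2 liAbs 0
  have h1 := sumStep2 liAbs 1
  rw [Nat.cast_zero] at h0
  rw [Nat.cast_one] at h1
  rw [List.drop_zero] at h0
  rw [List.drop_one] at h1
  by_cases hp : liAbs.length % 2 = 1
  · rw [if_pos (by rw [hmod]; simp [hp]), h0, ← frontAlt_parity liAbs, if_pos hp]
  · rw [if_neg (by rw [hmod]; simp; omega), h1, ← frontAlt_parity liAbs, if_neg hp]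

-- B's toggle fold computes frontAlt of the abs list (both flag states at once)
theorem blockSum_fold (li : List Int) :
    ∀ (t : Int),
      (li.foldl (fun (st : Int × Bool) x =>
          ((if st.2 then st.1 + |x| else st.1), !st.2)) (t, true)).1
        = t + frontAlt (li.map (fun x => |x|))
      ∧ (li.foldl (fun (st : Int × Bool) x =>
          ((if st.2 then st.1 + |x| else st.1), !st.2)) (t, false)).1
        = t + frontAlt ((li.map (fun x => |x|)).tail) := by
  induction li with
  | nil => intro t; simp [frontAlt_nil]
  | cons a l IH =>
    intro t
    constructor
    · simp only [List.foldl_cons, if_true, Bool.not_true, List.map_cons, frontAlt_cons]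
      rw [(IH (t + |a|)).2]
      ring
    · simp only [List.foldl_cons, if_neg Bool.false_ne_true, List.map_cons, List.tail_cons,
        Bool.not_false]
      rw [(IH t).1]

theorem blockSum_eq (li : List Int) : blockSum li = frontAlt (li.map (fun x => |x|)) := by
  unfold blockSum
  rw [(blockSum_fold li 0).1]
  ring

-- descending sort is the reverse of the ascending sort (Int values, identity key)
theorem sorted_rev_eq_reverse (l : List Int) :
    PySem.List.sorted l (fun x => x) true = (PySem.List.sorted l (fun x => x) false).reverse := by
  have h : PySem.List.sorted l (fun x => x) false
      = (PySem.List.sorted l (fun x => x) true).reverse := by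
    refine List.Perm.eq_of_pairwise' (r := fun a b : Int => a ≤ b)
      (PySem.List.sorted_pairwise l (fun x => x))
      (List.pairwise_reverse.mpr (PySem.List.sorted_pairwise_rev l (fun x => x)))
      ((PySem.List.sorted_perm l (fun x => x) false).trans
        ((PySem.List.sorted_perm l (fun x => x) true).symm.trans (List.reverse_perm _).symm))
  rw [h, List.reverse_reverse]

-- ===== VERDICT (by name: the statement is the Claim_ definition above) =====
theorem solution_spec : Claim_equal_solution := by
  intro list_ _
  unfold Spec_solution solution solution_alt
  simp only [footSum_eq, blockSum_eq, sorted_rev_eq_reverse, List.filter_reverse,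
    ← List.map_reverse]
  ring
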